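-- pv_equiv track=rewrite | github.com/anschmieg/quiz-from-json | scripts/update_schema.py | ensure_topic_array
-- ===== SOURCE A (Python) =====
-- def normalize_text(s):
--     if s is None:
--         return ""
--     return str(s).strip()
--
-- def ensure_topic_array(val):
--     if val is None:
--         return []
--     if isinstance(val, list):
--         return [normalize_text(t) for t in val if normalize_text(t)]
--     s = str(val)
--     # split on common separators
--     parts = [
--         p.strip()
--         for p in s.replace("\u2013", "-").replace(":", ";").replace("/", ";").split(";")
--     ]
--     # also split comma-separated subparts
--     expanded = []
--     for part in parts:
--         expanded.extend([p.strip() for p in part.split(",") if p.strip()])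
--     return [normalize_text(p) for p in expanded if normalize_text(p)]
-- ===== SOURCE B (Python) =====
-- def ensure_topic_array(val):
--     if val is None:
--         return []
--     if isinstance(val, list):
--         out = []
--         for t in val:
--             t = "" if t is None else str(t).strip()
--             if t:
--                 out.append(t)
--         return out
--     # single left-to-right scan: emit a stripped token at every separator
--     out = []
--     buf = []
--     for ch in str(val).replace("\u2013", "-"):
--         if ch in ";:/,":
--             t = "".join(buf).strip()
--             if t:
--                 out.append(t)
--             buf = []
--         else:
--             buf.append(ch)
--     t = "".join(buf).strip()
--     if t:
--         out.append(t)
--     return out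
-- ===== Notes on version B (the rewrite author's own statement) =====
-- stated objective: alternative
-- what changed: A's replace chain, semicolon split, nested comma-split loop and final re-strip/filter pass are replaced by a single left-to-right character scan with a buffer that emits a stripped token at each of the four separators.
import Mathlib
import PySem

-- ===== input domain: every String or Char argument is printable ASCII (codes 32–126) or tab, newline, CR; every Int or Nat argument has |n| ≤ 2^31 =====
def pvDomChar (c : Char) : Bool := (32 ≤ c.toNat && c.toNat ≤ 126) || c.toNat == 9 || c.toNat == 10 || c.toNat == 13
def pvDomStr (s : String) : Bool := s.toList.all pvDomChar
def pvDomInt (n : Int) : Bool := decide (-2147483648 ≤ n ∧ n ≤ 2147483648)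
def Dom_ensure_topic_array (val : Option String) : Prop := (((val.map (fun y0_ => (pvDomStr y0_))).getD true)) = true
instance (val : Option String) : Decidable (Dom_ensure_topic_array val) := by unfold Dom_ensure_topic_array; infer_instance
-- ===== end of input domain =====

-- B replaces A's replace-chain + `;`-split + nested `,`-split + final re-strip pass by one
-- left-to-right scan with a buffer that emits a stripped token at each of the four separators.
-- Strings are represented as List Char inside both ports (rebuilt with String.ofList at the end);
-- for an Option String argument Python's `isinstance(val, list)` branch is unreachable and is not ported.

-- ===== PORT A =====
-- normalize_text(s) for a str argument: str(s).strip()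
def pvNormalizeText (s : List Char) : List Char := PySem.Chars.strip s

-- s.replace("\u2013", "-").replace(":", ";").replace("/", ";")
def pvS1 (cs : List Char) : List Char :=
  PySem.Chars.replace (PySem.Chars.replace (PySem.Chars.replace cs ['–'] ['-']) [':'] [';']) ['/'] [';']

-- parts = [p.strip() for p in s1.split(";")]
def pvParts (cs : List Char) : List (List Char) := (PySem.Chars.splitOn (pvS1 cs) [';']).map PySem.Chars.strip

-- the `expanded.extend(...)` loop
def pvExpanded (cs : List Char) : List (List Char) :=
  (pvParts cs).foldl (fun acc part =>
    acc ++ ((PySem.Chars.splitOn part [',']).filter (fun p => PySem.Chars.strip p ≠ [])).map PySem.Chars.strip) []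

-- [normalize_text(p) for p in expanded if normalize_text(p)]
def pvAcore (cs : List Char) : List (List Char) :=
  ((pvExpanded cs).filter (fun p => pvNormalizeText p ≠ [])).map pvNormalizeText

def ensure_topic_array (val : Option String) : List String :=
  match val with
  | none => []
  | some s => (pvAcore s.toList).map (fun t => String.ofList t)

-- ===== PORT B =====
-- `ch in ";:/,"`
def pvSep (c : Char) : Bool := c == ';' || c == ':' || c == '/' || c == ','

-- one loop step of Source B: state = (tokens emitted so far, current buffer)
def pvBstep (st : List (List Char) × List Char) (ch : Char) : List (List Char) × List Char :=
  if pvSep ch then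
    let t := PySem.Chars.strip st.2
    (if t ≠ [] then st.1 ++ [t] else st.1, [])
  else (st.1, st.2 ++ [ch])

-- the final flush after the loop
def pvFlush (st : List (List Char) × List Char) : List (List Char) :=
  if PySem.Chars.strip st.2 ≠ [] then st.1 ++ [PySem.Chars.strip st.2] else st.1

def ensure_topic_array_alt (val : Option String) : List String :=
  match val with
  | none => []
  | some s =>
    (pvFlush ((PySem.Chars.replace s.toList ['–'] ['-']).foldl pvBstep ([], []))).map (fun t => String.ofList t)

-- ===== PRECONDITION & SPEC =====
def Spec_ensure_topic_array (val : Option String) (out : List String) : Prop := out = ensure_topic_array_alt val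
instance (val : Option String) (out : List String) : Decidable (Spec_ensure_topic_array val out) := by unfold Spec_ensure_topic_array; infer_instance

-- ===== CLAIM (what is proved, stated in full; the proofs are below) =====
def Claim_equal_ensure_topic_array : Prop := ∀ (val : Option String), Dom_ensure_topic_array val → Spec_ensure_topic_array val (ensure_topic_array val)

-- ===== LEMMAS AND PROOFS =====

-- proof-only abbreviations
def pvWs (c : Char) : Bool := PySem.Chars.isspace c
def pvPc (c : Char) : Bool := c == ','
def pvP3 (c : Char) : Bool := c == ';' || c == ':' || c == '/'

-- reference splitter: split `rest` at chars satisfying P, `cur` = chars of the open piece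
def pvSplit (P : Char → Bool) : List Char → List Char → List (List Char)
  | cur, [] => [cur]
  | cur, c :: t => if P c then cur :: pvSplit P [] t else pvSplit P (cur ++ [c]) t

-- strip each piece, keep the nonempty ones
def pvPipeOf (l : List (List Char)) : List (List Char) :=
  (l.map PySem.Chars.strip).filter (fun p => p ≠ [])

def pvPipeC (x : List Char) : List (List Char) := pvPipeOf (pvSplit pvPc [] x)

-- A's two-level split as one recursion (flush pvPipeC at each `;`-level separator)
def pvTOK : List Char → List Char → List (List Char)
  | cur, [] => pvPipeC cur
  | cur, c :: y => if pvP3 c then pvPipeC cur ++ pvTOK [] y else pvTOK (cur ++ [c]) y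

-- same, flushing at all four separators (B's token stream)
def pvTok4 : List Char → List Char → List (List Char)
  | cur, [] => pvPipeC cur
  | cur, c :: y => if pvSep c then pvPipeC cur ++ pvTok4 [] y else pvTok4 (cur ++ [c]) y

theorem pv_replace_go (a b : Char) : ∀ (fuel : Nat) (l acc : List Char), l.length ≤ fuel →
    PySem.Chars.replace.go [a] [b] fuel l acc = acc.reverse ++ l.map (fun c => if c == a then b else c) := by
  intro fuel
  induction fuel with
  | zero =>
    intro l acc h
    have : l = [] := List.eq_nil_of_length_eq_zero (Nat.le_zero.mp h)
    subst this; simp [PySem.Chars.replace.go]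
  | succ n ih =>
    intro l acc h
    cases l with
    | nil => simp [PySem.Chars.replace.go]
    | cons c t =>
      simp only [PySem.Chars.replace.go]
      by_cases hc : c = a
      · subst hc
        simp [List.isPrefixOf, ih t _ (by simpa using h)]
      · simp [List.isPrefixOf, hc, ih t _ (by simpa using h), Ne.symm hc]

theorem pv_replace_single (l : List Char) (a b : Char) :
    PySem.Chars.replace l [a] [b] = l.map (fun c => if c == a then b else c) := by
  simp [PySem.Chars.replace, pv_replace_go a b l.length l [] le_rfl]

theorem pv_splitOn_go (c : Char) : ∀ (fuel : Nat) (l cur : List Char) (acc : List (List Char)), l.length < fuel →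
    PySem.Chars.splitOn.go [c] fuel l cur acc = acc.reverse ++ pvSplit (fun d => d == c) cur.reverse l := by
  intro fuel
  induction fuel with
  | zero => intro l cur acc h; omega
  | succ n ih =>
    intro l cur acc h
    cases l with
    | nil => simp [PySem.Chars.splitOn.go, pvSplit]
    | cons c' t =>
      simp only [PySem.Chars.splitOn.go]
      by_cases hc : c' = c
      · subst hc
        simp [List.isPrefixOf, ih t [] _ (by simpa using h), pvSplit]
      · simp [List.isPrefixOf, hc, ih t (c' :: cur) acc (by simpa using h), Ne.symm hc, pvSplit]

theorem pv_splitOn_single (l : List Char) (c : Char) :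
    PySem.Chars.splitOn l [c] = pvSplit (fun d => d == c) [] l := by
  simpa using pv_splitOn_go c (l.length + 1) l [] [] (by omega)

theorem pv_split_nosep (P : Char → Bool) : ∀ (x cur t : List Char), (∀ c ∈ x, P c = false) →
    pvSplit P cur (x ++ t) = pvSplit P (cur ++ x) t := by
  intro x
  induction x with
  | nil => simp
  | cons c xs ih =>
    intro cur t h
    have hc : P c = false := h c (by simp)
    simp only [List.cons_append, pvSplit, hc, Bool.false_eq_true, if_false]
    rw [ih (cur ++ [c]) t (fun d hd => h d (by simp [hd]))]
    simp

theorem pv_split_all_nosep (P : Char → Bool) (x cur : List Char) (h : ∀ c ∈ x, P c = false) :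
    pvSplit P cur x = [cur ++ x] := by
  have := pv_split_nosep P x cur [] h
  simpa [pvSplit] using this

theorem pv_split_sep (P : Char → Bool) (c : Char) (hc : P c = true) : ∀ (x cur w : List Char),
    pvSplit P cur (x ++ c :: w) = pvSplit P cur x ++ pvSplit P [] w := by
  intro x
  induction x with
  | nil => simp [pvSplit, hc]
  | cons d xs ih =>
    intro cur w
    by_cases hd : P d = true
    · simp [pvSplit, hd, ih]
    · simp only [Bool.not_eq_true] at hd
      simp [pvSplit, hd, ih]

theorem pv_pipeOf_append (l₁ l₂ : List (List Char)) : pvPipeOf (l₁ ++ l₂) = pvPipeOf l₁ ++ pvPipeOf l₂ := by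
  simp [pvPipeOf]

theorem pv_strip_ws_left (w x : List Char) (h : ∀ c ∈ w, pvWs c = true) :
    PySem.Chars.strip (w ++ x) = PySem.Chars.strip x := by
  unfold PySem.Chars.strip PySem.Chars.lstrip
  rw [List.dropWhile_append]
  have h' : ∀ c ∈ w, PySem.Chars.isspace c = true := fun c hc => by simpa [pvWs] using h c hc
  have hw : List.dropWhile PySem.Chars.isspace w = [] := List.dropWhile_eq_nil_iff.mpr h'
  simp [hw]

theorem pv_rstrip_ws (x w : List Char) (h : ∀ c ∈ w, pvWs c = true) :
    PySem.Chars.rstrip (x ++ w) = PySem.Chars.rstrip x := by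
  unfold PySem.Chars.rstrip
  rw [List.reverse_append, List.dropWhile_append]
  have h' : ∀ c ∈ w.reverse, PySem.Chars.isspace c = true := fun c hc => by
    simpa [pvWs] using h c (List.mem_reverse.mp hc)
  have hw : List.dropWhile PySem.Chars.isspace w.reverse = [] := List.dropWhile_eq_nil_iff.mpr h'
  simp [hw]

theorem pv_strip_ws_right (x w : List Char) (h : ∀ c ∈ w, pvWs c = true) :
    PySem.Chars.strip (x ++ w) = PySem.Chars.strip x := by
  unfold PySem.Chars.strip PySem.Chars.lstrip
  rw [List.dropWhile_append]
  by_cases he : (List.dropWhile PySem.Chars.isspace x).isEmpty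
  · have hx : List.dropWhile PySem.Chars.isspace x = [] := by simpa [List.isEmpty_iff] using he
    have hw : List.dropWhile PySem.Chars.isspace w = [] :=
      List.dropWhile_eq_nil_iff.mpr (fun c hc => by simpa [pvWs] using h c hc)
    simp [hx, hw, PySem.Chars.rstrip]
  · simp only [he, if_false, Bool.false_eq_true]
    exact pv_rstrip_ws _ w h

theorem pv_dropWhile_cons_head (p : Char → Bool) (x : List Char) (a : Char) (t : List Char)
    (h : x.dropWhile p = a :: t) : p a = false := by
  have hne : x.dropWhile p ≠ [] := by simp [h]
  have := List.head_dropWhile_not p hne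
  simpa [h] using this

theorem pv_strip_idem (x : List Char) : PySem.Chars.strip (PySem.Chars.strip x) = PySem.Chars.strip x := by
  unfold PySem.Chars.strip PySem.Chars.rstrip PySem.Chars.lstrip
  set p := PySem.Chars.isspace with hp
  set y := List.dropWhile p x with hy
  set r := List.dropWhile p y.reverse with hr
  have hpre : r.reverse <+: y := by
    rcases List.dropWhile_suffix (l := y.reverse) p with ⟨s, hs⟩
    exact ⟨s.reverse, by rw [← List.reverse_append, hs, List.reverse_reverse]⟩
  have h1 : List.dropWhile p r.reverse = r.reverse := by
    cases hz : r.reverse with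
    | nil => simp
    | cons a t =>
      have hay : ∃ t', y = a :: t' := by
        rcases hpre with ⟨s, hs⟩
        rw [hz] at hs
        exact ⟨t ++ s, by simpa using hs.symm⟩
      rcases hay with ⟨t', ht'⟩
      have hpa : p a = false := pv_dropWhile_cons_head p x a t' (by rw [← hy, ← ht'])
      simp [List.dropWhile, hpa]
  rw [h1, List.reverse_reverse, hr, List.dropWhile_idempotent]

theorem pv_ws_not_pc (c : Char) (h : pvWs c = true) : pvPc c = false := by
  by_cases hc : c = ','
  · subst hc; exact absurd h (by decide)
  · simp [pvPc, hc]

theorem pv_pipeOf_ws_cur (P : Char → Bool) : ∀ (t w cur : List Char), (∀ c ∈ w, pvWs c = true) →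
    pvPipeOf (pvSplit P (w ++ cur) t) = pvPipeOf (pvSplit P cur t) := by
  intro t
  induction t with
  | nil => intro w cur h; simp [pvSplit, pvPipeOf, pv_strip_ws_left w cur h]
  | cons c t ih =>
    intro w cur h
    by_cases hc : P c = true
    · simp [pvSplit, hc, pvPipeOf, pv_strip_ws_left w cur h]
    · simp only [Bool.not_eq_true] at hc
      simp only [pvSplit, hc, Bool.false_eq_true, if_false, List.append_assoc]
      exact ih w (cur ++ [c]) h

theorem pv_pipeOf_ws_right (P : Char → Bool) (hP : ∀ c, pvWs c = true → P c = false) :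
    ∀ (z w cur : List Char), (∀ c ∈ w, pvWs c = true) →
    pvPipeOf (pvSplit P cur (z ++ w)) = pvPipeOf (pvSplit P cur z) := by
  intro z
  induction z with
  | nil =>
    intro w cur h
    rw [List.nil_append, pv_split_all_nosep P w cur (fun c hc => hP c (h c hc))]
    simp [pvSplit, pvPipeOf, pv_strip_ws_right cur w h]
  | cons c z ih =>
    intro w cur h
    by_cases hc : P c = true
    · simp only [List.cons_append, pvSplit, hc, if_true]
      have htl : pvPipeOf (pvSplit P [] (z ++ w)) = pvPipeOf (pvSplit P [] z) := ih w [] h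
      simp only [pvPipeOf, List.map_cons, List.filter_cons] at htl ⊢
      rw [htl]
    · simp only [Bool.not_eq_true] at hc
      simp only [List.cons_append, pvSplit, hc, Bool.false_eq_true, if_false]
      exact ih w (cur ++ [c]) h

theorem pv_pipeC_strip (x : List Char) : pvPipeC (PySem.Chars.strip x) = pvPipeC x := by
  have hws : ∀ c, pvWs c = true → pvPc c = false := pv_ws_not_pc
  -- x = takeWhile ws x ++ lstrip x
  have hx : x = x.takeWhile pvWs ++ List.dropWhile pvWs x := (List.takeWhile_append_dropWhile).symm
  have hwl : ∀ c ∈ x.takeWhile pvWs, pvWs c = true := fun c hc => List.mem_takeWhile_imp hc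
  -- lstrip x = strip x ++ trailing ws
  set y := List.dropWhile pvWs x with hy
  have hyr : y.reverse = (y.reverse.takeWhile pvWs) ++ List.dropWhile pvWs y.reverse :=
    (List.takeWhile_append_dropWhile).symm
  have hdec : y = (List.dropWhile pvWs y.reverse).reverse ++ (y.reverse.takeWhile pvWs).reverse := by
    have h2 := congrArg List.reverse hyr
    rw [List.reverse_reverse, List.reverse_append] at h2
    exact h2
  have hstrip : PySem.Chars.strip x = (List.dropWhile pvWs y.reverse).reverse := by
    unfold PySem.Chars.strip PySem.Chars.rstrip PySem.Chars.lstrip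
    have : List.dropWhile PySem.Chars.isspace x = y := by rw [hy]; rfl
    rw [this]
    rfl
  have hwr : ∀ c ∈ (y.reverse.takeWhile pvWs).reverse, pvWs c = true := fun c hc =>
    List.mem_takeWhile_imp (List.mem_reverse.mp hc)
  unfold pvPipeC
  conv_rhs => rw [hx]
  rw [pv_split_nosep pvPc (x.takeWhile pvWs) [] y (fun c hc => hws c (hwl c hc))]
  rw [List.nil_append]
  have h1 : pvPipeOf (pvSplit pvPc (x.takeWhile pvWs) y) = pvPipeOf (pvSplit pvPc [] y) := by
    have := pv_pipeOf_ws_cur pvPc y (x.takeWhile pvWs) [] hwl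
    simpa using this
  rw [h1]
  conv_rhs => rw [hdec]
  rw [pv_pipeOf_ws_right pvPc hws _ _ _ hwr, hstrip]

theorem pv_split_map_h : ∀ (u cur : List Char),
    pvSplit (fun d => d == ';') cur (u.map (fun c => if (if c == ':' then ';' else c) == '/' then ';' else (if c == ':' then ';' else c)))
      = pvSplit pvP3 cur u := by
  intro u
  induction u with
  | nil => intro cur; simp [pvSplit]
  | cons c t ih =>
    intro cur
    by_cases h1 : c = ';'
    · subst h1; simp only [List.map_cons]; simp [pvSplit, pvP3]; simpa using ih []
    by_cases h2 : c = ':'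
    · subst h2; simp only [List.map_cons]; simp [pvSplit, pvP3]; simpa using ih []
    by_cases h3 : c = '/'
    · subst h3; simp only [List.map_cons]; simp [pvSplit, pvP3]; simpa using ih []
    · simp only [List.map_cons]; simp [pvSplit, pvP3, h1, h2, h3]; simpa using ih (cur ++ [c])

theorem pv_flatMap_TOK : ∀ (y cur : List Char),
    (pvSplit pvP3 cur y).flatMap pvPipeC = pvTOK cur y := by
  intro y
  induction y with
  | nil => intro cur; simp [pvSplit, pvTOK]
  | cons c t ih =>
    intro cur
    by_cases hc : pvP3 c = true
    · simp [pvSplit, pvTOK, hc, ih]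
    · simp only [Bool.not_eq_true] at hc
      simp [pvSplit, pvTOK, hc, ih]

theorem pv_pipeC_comma (x w : List Char) : pvPipeC (x ++ ',' :: w) = pvPipeC x ++ pvPipeC w := by
  unfold pvPipeC
  rw [pv_split_sep pvPc ',' (by decide) x [] w, pv_pipeOf_append]

theorem pv_TOK_comma : ∀ (y cur w : List Char), pvTOK (cur ++ ',' :: w) y = pvPipeC cur ++ pvTOK w y := by
  intro y
  induction y with
  | nil => intro cur w; simp [pvTOK, pv_pipeC_comma]
  | cons c t ih =>
    intro cur w
    by_cases hc : pvP3 c = true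
    · simp [pvTOK, hc, pv_pipeC_comma]
    · simp only [Bool.not_eq_true] at hc
      simp only [pvTOK, hc, Bool.false_eq_true, if_false]
      have : cur ++ ',' :: w ++ [c] = cur ++ ',' :: (w ++ [c]) := by simp
      rw [List.append_assoc] at *
      have h2 := ih cur (w ++ [c])
      simpa using h2

theorem pv_sep_eq (c : Char) : pvSep c = (pvP3 c || (c == ',')) := by
  simp [pvSep, pvP3, Bool.or_assoc]

theorem pv_TOK_eq_Tok4 : ∀ (y cur : List Char), pvTOK cur y = pvTok4 cur y := by
  intro y
  induction y with
  | nil => intro cur; simp [pvTOK, pvTok4]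
  | cons c t ih =>
    intro cur
    by_cases h3 : pvP3 c = true
    · have hs : pvSep c = true := by rw [pv_sep_eq, h3]; simp
      simp [pvTOK, pvTok4, h3, hs, ih]
    · simp only [Bool.not_eq_true] at h3
      by_cases hcm : c = ','
      · subst hcm
        have hs : pvSep ',' = true := by rw [pv_sep_eq]; simp
        simp only [pvTOK, pvTok4, h3, Bool.false_eq_true, if_false, hs, if_true]
        rw [show cur ++ [','] = cur ++ ',' :: ([] : List Char) from rfl]
        rw [pv_TOK_comma t cur [], ih []]
      · have hs : pvSep c = false := by rw [pv_sep_eq, h3]; simp [hcm]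
        simp [pvTOK, pvTok4, h3, hs, ih]

theorem pv_pipeC_nocomma (cur : List Char) (h : ∀ c ∈ cur, pvPc c = false) :
    pvPipeC cur = if PySem.Chars.strip cur ≠ [] then [PySem.Chars.strip cur] else [] := by
  unfold pvPipeC
  rw [pv_split_all_nosep pvPc cur [] h]
  by_cases hs : PySem.Chars.strip cur = []
  · simp [pvPipeOf, hs]
  · simp [pvPipeOf, hs]

theorem pv_B_fold : ∀ (u : List Char) (out : List (List Char)) (buf : List Char),
    (∀ c ∈ buf, pvPc c = false) →
    pvFlush (u.foldl pvBstep (out, buf)) = out ++ pvTok4 buf u := by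
  intro u
  induction u with
  | nil =>
    intro out buf h
    simp only [List.foldl_nil, pvTok4, pvFlush]
    rw [pv_pipeC_nocomma buf h]
    by_cases hs : PySem.Chars.strip buf = [] <;> simp [hs]
  | cons c t ih =>
    intro out buf h
    by_cases hc : pvSep c = true
    · simp only [List.foldl_cons, pvBstep, hc, if_true, pvTok4]
      rw [ih _ [] (by simp)]
      rw [pv_pipeC_nocomma buf h]
      by_cases hs : PySem.Chars.strip buf = [] <;> simp [hs]
    · simp only [Bool.not_eq_true] at hc
      have hnc : pvPc c = false := by
        have := pv_sep_eq c
        rw [hc] at this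
        rcases Bool.or_eq_false_iff.mp this.symm with ⟨_, h2⟩
        exact h2
      simp only [List.foldl_cons, pvBstep, hc, Bool.false_eq_true, if_false, pvTok4]
      exact ih out (buf ++ [c]) (fun d hd => by
        rcases List.mem_append.mp hd with hd | hd
        · exact h d hd
        · simp at hd; subst hd; exact hnc)

theorem pv_mem_pipeOf (l : List (List Char)) (x : List Char) (hx : x ∈ pvPipeOf l) :
    PySem.Chars.strip x = x ∧ x ≠ [] := by
  unfold pvPipeOf at hx
  rcases List.mem_filter.mp hx with ⟨hm, hne⟩
  rcases List.mem_map.mp hm with ⟨q, _, rfl⟩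
  refine ⟨pv_strip_idem q, by simpa using hne⟩

theorem pv_mem_Tok4 : ∀ (y cur : List Char) (x : List Char), x ∈ pvTok4 cur y →
    PySem.Chars.strip x = x ∧ x ≠ [] := by
  intro y
  induction y with
  | nil => intro cur x hx; exact pv_mem_pipeOf _ x hx
  | cons c t ih =>
    intro cur x hx
    by_cases hc : pvSep c = true
    · simp only [pvTok4, hc, if_true, List.mem_append] at hx
      rcases hx with hx | hx
      · exact pv_mem_pipeOf _ x hx
      · exact ih [] x hx
    · simp only [Bool.not_eq_true] at hc
      simp only [pvTok4, hc, Bool.false_eq_true, if_false] at hx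
      exact ih (cur ++ [c]) x hx

theorem pv_fix_list : ∀ (E : List (List Char)), (∀ x ∈ E, PySem.Chars.strip x = x ∧ x ≠ []) →
    (E.filter (fun p => PySem.Chars.strip p ≠ [])).map PySem.Chars.strip = E := by
  intro E
  induction E with
  | nil => simp
  | cons x E ih =>
    intro h
    have hx := h x (by simp)
    have hne : PySem.Chars.strip x ≠ [] := by rw [hx.1]; exact hx.2
    have hc : (decide (PySem.Chars.strip x ≠ [])) = true := by simpa using hne
    simp only [List.filter_cons, hc, if_true, List.map_cons]
    rw [hx.1, ih (fun y hy => h y (by simp [hy]))]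

theorem pv_inner_pipeC (x : List Char) :
    ((PySem.Chars.splitOn x [',']).filter (fun p => PySem.Chars.strip p ≠ [])).map PySem.Chars.strip = pvPipeC x := by
  rw [pv_splitOn_single]
  unfold pvPipeC pvPipeOf
  rw [List.filter_map]
  rfl

theorem pv_core_eq (cs : List Char) :
    pvAcore cs = pvTok4 [] (cs.map (fun c => if c == '–' then '-' else c)) := by
  unfold pvAcore pvExpanded pvParts pvS1 pvNormalizeText
  rw [pv_replace_single, pv_replace_single, pv_replace_single, List.map_map, pv_splitOn_single]
  set u := cs.map (fun c => if c == '–' then '-' else c) with hu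
  have hmh : pvSplit (fun d => d == ';')
      [] (u.map (fun c => if (if c == ':' then ';' else c) == '/' then ';' else (if c == ':' then ';' else c)))
      = pvSplit pvP3 [] u := pv_split_map_h u []
  have hcomp : (List.map ((fun c => if c == '/' then ';' else c) ∘ (fun c => if c == ':' then ';' else c)) u)
      = u.map (fun c => if (if c == ':' then ';' else c) == '/' then ';' else (if c == ':' then ';' else c)) := rfl
  rw [hcomp, hmh]
  have hfold : ∀ (l : List (List Char)) (acc : List (List Char)),
      l.foldl (fun acc part =>
        acc ++ ((PySem.Chars.splitOn part [',']).filter (fun p => PySem.Chars.strip p ≠ [])).map PySem.Chars.strip) acc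
      = acc ++ l.flatMap pvPipeC := by
    intro l
    induction l with
    | nil => intro acc; simp
    | cons p l ih => intro acc; rw [List.foldl_cons, ih, pv_inner_pipeC]; simp
  have hmapstrip : (List.map PySem.Chars.strip (pvSplit pvP3 [] u)).flatMap pvPipeC
      = (pvSplit pvP3 [] u).flatMap pvPipeC := by
    rw [List.flatMap_map]
    exact List.flatMap_congr (fun x _ => pv_pipeC_strip x)
  rw [hfold, List.nil_append, hmapstrip, pv_flatMap_TOK, pv_TOK_eq_Tok4]
  exact pv_fix_list _ (fun x hx => pv_mem_Tok4 _ [] x hx)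

-- ===== VERDICT (by name: the statement is the Claim_ definition above) =====
theorem ensure_topic_array_spec : Claim_equal_ensure_topic_array := by
  intro val _
  unfold Spec_ensure_topic_array
  cases val with
  | none => rfl
  | some s =>
    show (pvAcore s.toList).map _ = _
    rw [pv_core_eq]
    show _ = (pvFlush ((PySem.Chars.replace s.toList ['–'] ['-']).foldl pvBstep ([], []))).map (fun t => String.ofList t)
    rw [pv_replace_single, pv_B_fold _ [] [] (by simp), List.nil_append]
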